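-- pv_equiv track=rewrite | github.com/BPRC-Bioinfo/VDJ-insights | vdj_insights/scripts/report.py | parse_btop
-- ===== SOURCE A (Python) =====
-- def parse_btop(btop):
--     snps = 0
--     insertions = 0
--     deletions = 0
--     i = 0
--     while i < len(btop):
--         if btop[i].isdigit():
--             while i < len(btop) and btop[i].isdigit():
--                 i += 1
--         elif i + 1 < len(btop) and btop[i].isalpha() and btop[i + 1].isalpha():
--             snps += 1
--             i += 2
--         elif btop[i] == "-":
--             if i > 0 and btop[i - 1].isalpha():
--                 deletions += 1
--             elif i + 1 < len(btop) and btop[i + 1].isalpha():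
--                 insertions += 1
--             i += 1
--         else:
--             i += 1
--     return snps, insertions, deletions
-- ===== SOURCE B (Python) =====
-- def parse_btop(btop):
--     # Pass 1: SNPs = sum of len(run)//2 over maximal alphabetic runs.
--     snps = 0
--     run = 0
--     for c in btop:
--         if c.isalpha():
--             run += 1
--         else:
--             snps += run // 2
--             run = 0
--     snps += run // 2
--     # Pass 2: classify each '-' by its raw neighbors (deletion beats insertion).
--     nxt = [c.isalpha() for c in btop[1:]] + [False]
--     insertions = 0
--     deletions = 0
--     prev = ''
--     for c, na in zip(btop, nxt):
--         if c == '-':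
--             if prev.isalpha():
--                 deletions += 1
--             elif na:
--                 insertions += 1
--         prev = c
--     return snps, insertions, deletions
-- ===== Notes on version B (the rewrite author's own statement) =====
-- stated objective: simpler
-- what changed: Replaces A's single index-driven state machine (nested digit-skip loop, pairwise i+=2 consumption, backward/forward index probes) with two independent passes: SNPs as the sum of floor(run/2) over maximal alphabetic runs, and each gap character classified locally by its raw neighbors via a zipped next-is-alpha list.
import Mathlib
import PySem

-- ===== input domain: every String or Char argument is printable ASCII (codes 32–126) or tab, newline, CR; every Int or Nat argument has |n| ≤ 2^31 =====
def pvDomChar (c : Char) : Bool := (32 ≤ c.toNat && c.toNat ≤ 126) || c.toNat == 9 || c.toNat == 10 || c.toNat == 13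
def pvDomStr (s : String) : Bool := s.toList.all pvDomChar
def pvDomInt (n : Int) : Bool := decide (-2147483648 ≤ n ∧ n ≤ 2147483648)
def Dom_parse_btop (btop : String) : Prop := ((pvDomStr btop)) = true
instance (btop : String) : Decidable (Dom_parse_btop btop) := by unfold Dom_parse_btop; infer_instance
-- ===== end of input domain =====

-- B replaces A's single index state machine by two independent passes (runs//2 for SNPs;
-- local neighbor classification of each gap character): objective = simpler, same O(n) cost.

-- ===== PORT A =====
-- inner `while i < len(btop) and btop[i].isdigit(): i += 1`; returns (last consumed char, rest)
def pvSkipDigits (p : Char) : List Char → Char × List Char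
  | [] => (p, [])
  | c :: rest => if PySem.Chars.isdigit c then pvSkipDigits c rest else (p, c :: rest)

theorem pvSkipDigits_len (p : Char) (l : List Char) : (pvSkipDigits p l).2.length ≤ l.length := by
  induction l generalizing p with
  | nil => simp [pvSkipDigits]
  | cons c rest ih =>
    simp only [pvSkipDigits]
    split
    · exact le_trans (ih c) (Nat.le_succ _)
    · simp

-- the outer while loop of A; `prev` is btop[i-1] (none at i = 0)
def pvLoopA (prev : Option Char) (l : List Char) (snps ins del : Int) : Int × Int × Int :=
  match l with
  | [] => (snps, ins, del)
  | c :: rest =>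
    if PySem.Chars.isdigit c then
      let q := pvSkipDigits c rest
      pvLoopA (some q.1) q.2 snps ins del
    else if PySem.Chars.isalpha c && rest.head?.any PySem.Chars.isalpha then
      pvLoopA rest.head? rest.tail (snps + 1) ins del
    else if c == '-' then
      if prev.any PySem.Chars.isalpha then pvLoopA (some c) rest snps ins (del + 1)
      else if rest.head?.any PySem.Chars.isalpha then pvLoopA (some c) rest snps (ins + 1) del
      else pvLoopA (some c) rest snps ins del
    else pvLoopA (some c) rest snps ins del
termination_by l.length
decreasing_by
  · exact Nat.lt_succ_of_le (pvSkipDigits_len c rest)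
  · cases rest <;> simp
  all_goals simp

def parse_btop (btop : String) : Int × Int × Int :=
  pvLoopA none btop.toList 0 0 0

-- ===== PORT B =====
-- pass 1 step: accumulate (snps, current alpha-run length)
def pvSnpStep (acc : Int × Int) (c : Char) : Int × Int :=
  if PySem.Chars.isalpha c then (acc.1, acc.2 + 1)
  else (acc.1 + PySem.Int.floordiv acc.2 2, 0)

-- pass 2 step over (char, next-char-is-alpha) pairs; state (ins, del, prev)
def pvIndelStep (acc : Int × Int × Option Char) (p : Char × Bool) : Int × Int × Option Char :=
  let (ins, del, prev) := acc
  if p.1 == '-' then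
    if prev.any PySem.Chars.isalpha then (ins, del + 1, some p.1)
    else if p.2 then (ins + 1, del, some p.1)
    else (ins, del, some p.1)
  else (ins, del, some p.1)

def parse_btop_alt (btop : String) : Int × Int × Int :=
  let l := btop.toList
  let sr := l.foldl pvSnpStep (0, 0)
  let snps := sr.1 + PySem.Int.floordiv sr.2 2
  let nxt := (l.drop 1).map PySem.Chars.isalpha ++ [false]   -- btop[1:] as a drop; exact
  let idp := (l.zip nxt).foldl pvIndelStep (0, 0, none)
  (snps, idp.1, idp.2.1)

-- ===== PRECONDITION & SPEC =====
def Spec_parse_btop (btop : String) (out : Int × Int × Int) : Prop := out = parse_btop_alt btop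
instance (btop : String) (out : Int × Int × Int) : Decidable (Spec_parse_btop btop out) := by unfold Spec_parse_btop; infer_instance

-- ===== CLAIM (what is proved, stated in full; the proofs are below) =====
def Claim_equal_parse_btop : Prop := ∀ (btop : String), Dom_parse_btop btop → Spec_parse_btop btop (parse_btop btop)

-- ===== LEMMAS AND PROOFS =====

-- run-based SNP count: sB r l = (pending run r, then sum of floor(run/2) over alpha runs of l)
def pvSB (r : Int) : List Char → Int
  | [] => PySem.Int.floordiv r 2
  | c :: rest => if PySem.Chars.isalpha c then pvSB (r + 1) rest
                 else PySem.Int.floordiv r 2 + pvSB 0 rest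

-- neighbor classification of '-' characters: (insertions, deletions) of l given previous char
def pvG (prev : Option Char) : List Char → Int × Int
  | [] => (0, 0)
  | c :: rest =>
    let t := pvG (some c) rest
    if c == '-' then
      if prev.any PySem.Chars.isalpha then (t.1, t.2 + 1)
      else if rest.head?.any PySem.Chars.isalpha then (t.1 + 1, t.2)
      else t
    else t

theorem pv_fd2_succ2 (r : Int) :
    PySem.Int.floordiv (r + 2) 2 = PySem.Int.floordiv r 2 + 1 := by
  rw [PySem.Int.floordiv_eq_ediv_of_pos (by omega), PySem.Int.floordiv_eq_ediv_of_pos (by omega)]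
  omega

theorem pv_fd0 : PySem.Int.floordiv 0 2 = 0 := by decide

theorem pv_fd1 : PySem.Int.floordiv 1 2 = 0 := by decide

theorem pvSB_add2 (l : List Char) (r : Int) : pvSB (r + 2) l = 1 + pvSB r l := by
  induction l generalizing r with
  | nil => simp only [pvSB]; rw [pv_fd2_succ2]; ring
  | cons c rest ih =>
    simp only [pvSB]
    split
    · have := ih (r + 1); rw [show r + 2 + 1 = r + 1 + 2 by ring, this]
    · rw [pv_fd2_succ2]; ring

theorem pv_digit_not_alpha (c : Char) (h : PySem.Chars.isdigit c = true) :
    PySem.Chars.isalpha c = false := by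
  simp [PySem.Chars.isdigit, PySem.Chars.isalpha, PySem.Chars.isupper, PySem.Chars.islower,
    Char.le_def, UInt32.le_iff_toNat_le] at *
  omega

theorem pv_digit_ne_dash (c : Char) (h : PySem.Chars.isdigit c = true) : (c == '-') = false := by
  refine beq_eq_false_iff_ne.mpr (fun hc => ?_)
  subst hc; exact absurd h (by decide)

theorem pv_alpha_ne_dash (c : Char) (h : PySem.Chars.isalpha c = true) : (c == '-') = false := by
  refine beq_eq_false_iff_ne.mpr (fun hc => ?_)
  subst hc; exact absurd h (by decide)

-- skipping a digit prefix changes neither spec count, and ends on a digit prev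
theorem pvSkipDigits_spec (l : List Char) (p : Char) (hp : PySem.Chars.isdigit p = true) :
    pvSB 0 (pvSkipDigits p l).2 = pvSB 0 l ∧
    pvG (some (pvSkipDigits p l).1) (pvSkipDigits p l).2 = pvG (some p) l ∧
    PySem.Chars.isdigit (pvSkipDigits p l).1 = true := by
  induction l generalizing p with
  | nil => exact ⟨rfl, rfl, hp⟩
  | cons c rest ih =>
    simp only [pvSkipDigits]
    by_cases hc : PySem.Chars.isdigit c = true
    · simp only [hc, if_true]
      obtain ⟨h1, h2, h3⟩ := ih c hc
      refine ⟨?_, ?_, h3⟩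
      · rw [h1]; simp [pvSB, pv_digit_not_alpha c hc]
      · rw [h2]
        simp only [pvG, pv_digit_ne_dash c hc, Bool.false_eq_true, if_false]
    · simp only [hc, Bool.false_eq_true, if_false]
      exact ⟨by trivial, by trivial, hp⟩

-- A's loop equals the B-side specification counts
theorem pvLoopA_spec (n : Nat) :
    ∀ (l : List Char), l.length ≤ n → ∀ (prev : Option Char) (s i d : Int),
      pvLoopA prev l s i d =
        (s + pvSB 0 l, i + (pvG prev l).1, d + (pvG prev l).2) := by
  induction n with
  | zero =>
    intro l hl prev s i d
    have : l = [] := List.eq_nil_of_length_eq_zero (Nat.le_zero.mp hl)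
    subst this
    simp only [pvLoopA, pvSB, pvG, pv_fd0]
    ring_nf
  | succ n ih =>
    intro l hl prev s i d
    cases l with
    | nil => simp only [pvLoopA, pvSB, pvG, pv_fd0]; ring_nf
    | cons c rest =>
      have hr : rest.length ≤ n := by simpa using hl
      by_cases hdig : PySem.Chars.isdigit c = true
      · -- digit branch
        rw [pvLoopA]
        simp only [hdig, if_true]
        obtain ⟨h1, h2, h3⟩ := pvSkipDigits_spec rest c hdig
        have hlen : (pvSkipDigits c rest).2.length ≤ n :=
          le_trans (pvSkipDigits_len c rest) hr
        rw [ih _ hlen, h1, h2]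
        have hSB : pvSB 0 (c :: rest) = pvSB 0 rest := by
          simp [pvSB, pv_digit_not_alpha c hdig]
        have hG : pvG prev (c :: rest) = pvG (some c) rest := by
          simp only [pvG, pv_digit_ne_dash c hdig, Bool.false_eq_true, if_false]
        rw [hSB, hG]
      · by_cases hpair : (PySem.Chars.isalpha c && rest.head?.any PySem.Chars.isalpha) = true
        · -- SNP pair branch
          rw [pvLoopA]
          simp only [hdig, Bool.false_eq_true, if_false, hpair, if_true]
          obtain ⟨hca, hna⟩ := Bool.and_eq_true_iff.mp hpair
          cases rest with
          | nil => simp at hna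
          | cons c2 rest2 =>
            simp only [List.head?_cons, Option.any_some] at hna
            have hr2 : rest2.length ≤ n := le_trans (Nat.le_succ _) hr
            rw [show (c2 :: rest2).head? = some c2 from rfl, show (c2 :: rest2).tail = rest2 from rfl]
            rw [ih _ hr2]
            have hSB : pvSB 0 (c :: c2 :: rest2) = 1 + pvSB 0 rest2 := by
              have h2 : pvSB 0 (c :: c2 :: rest2) = pvSB 2 rest2 := by
                simp only [pvSB, hca, hna, if_true]; norm_num
              rw [h2, show (2 : Int) = 0 + 2 by ring, pvSB_add2]
            have hG : pvG prev (c :: c2 :: rest2) = pvG (some c2) rest2 := by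
              simp only [pvG, pv_alpha_ne_dash c hca, pv_alpha_ne_dash c2 hna,
                Bool.false_eq_true, if_false]
            rw [hSB, hG]; ring_nf
        · by_cases hdash : (c == '-') = true
          · -- '-' branch
            have hc : c = '-' := by simpa using hdash
            subst hc
            rw [pvLoopA]
            simp only [hdig, Bool.false_eq_true, if_false, hpair, hdash, if_true]
            have hG : pvG prev ('-' :: rest) =
                (let t := pvG (some '-') rest;
                 if prev.any PySem.Chars.isalpha then (t.1, t.2 + 1)
                 else if rest.head?.any PySem.Chars.isalpha then (t.1 + 1, t.2)
                 else t) := by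
              simp only [pvG, beq_self_eq_true, if_true]
            have hSB : pvSB 0 ('-' :: rest) = pvSB 0 rest := by
              simp only [pvSB, show PySem.Chars.isalpha '-' = false from by decide,
                Bool.false_eq_true, if_false, pv_fd0]
              ring
            by_cases hpa : prev.any PySem.Chars.isalpha = true
            · simp only [hpa, if_true]
              rw [ih _ hr, hSB, hG]
              simp only [hpa, if_true]
              ring_nf
            · simp only [hpa, Bool.false_eq_true, if_false]
              by_cases hnx : rest.head?.any PySem.Chars.isalpha = true
              · simp only [hnx, if_true]
                rw [ih _ hr, hSB, hG]
                simp only [hpa, hnx, if_true, Bool.false_eq_true, if_false]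
                ring_nf
              · simp only [hnx, Bool.false_eq_true, if_false]
                rw [ih _ hr, hSB, hG]
                simp only [hpa, hnx, Bool.false_eq_true, if_false]
          · -- else branch
            rw [pvLoopA]
            simp only [hdig, hpair, hdash, Bool.false_eq_true, if_false]
            rw [ih _ hr]
            have hSB : pvSB 0 (c :: rest) = pvSB 0 rest := by
              by_cases hca : PySem.Chars.isalpha c = true
              · have hnx : rest.head?.any PySem.Chars.isalpha = false := by
                  cases h : rest.head?.any PySem.Chars.isalpha
                  · rfl
                  · exact absurd (by simp [hca, h] : (PySem.Chars.isalpha c && rest.head?.any PySem.Chars.isalpha) = true) hpair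
                cases rest with
                | nil =>
                  simp only [pvSB, hca, if_true]
                  norm_num [pv_fd0, pv_fd1]
                | cons c2 rest2 =>
                  simp only [List.head?_cons, Option.any_some] at hnx
                  simp only [pvSB, hca, if_true, hnx, Bool.false_eq_true, if_false]
                  norm_num [pv_fd0, pv_fd1]
              · simp only [pvSB, hca, Bool.false_eq_true, if_false, pv_fd0]
                ring
            have hG : pvG prev (c :: rest) = pvG (some c) rest := by
              simp only [pvG, hdash, Bool.false_eq_true, if_false]
            rw [hSB, hG]

-- B's pass 1 fold equals pvSB
theorem pvSnpFold_spec (l : List Char) :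
    ∀ (s r : Int), (l.foldl pvSnpStep (s, r)).1 + PySem.Int.floordiv (l.foldl pvSnpStep (s, r)).2 2
      = s + pvSB r l := by
  induction l with
  | nil => intro s r; simp [pvSB]
  | cons c rest ih =>
    intro s r
    simp only [List.foldl_cons, pvSnpStep, pvSB]
    by_cases hca : PySem.Chars.isalpha c = true
    · simp only [hca, if_true]; exact ih s (r + 1)
    · simp only [hca, Bool.false_eq_true, if_false]
      rw [ih (s + PySem.Int.floordiv r 2) 0]; ring

-- the zipped next-is-alpha list decomposes structurally
theorem pv_zipNxt_cons (c : Char) (t : List Char) :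
    (c :: t).zip (((c :: t).drop 1).map PySem.Chars.isalpha ++ [false]) =
      (c, t.head?.any PySem.Chars.isalpha) :: t.zip ((t.drop 1).map PySem.Chars.isalpha ++ [false]) := by
  cases t with
  | nil => rfl
  | cons c2 t2 => rfl

-- B's pass 2 fold equals pvG (first two components)
theorem pvIndelFold_spec (l : List Char) :
    ∀ (prev : Option Char) (i d : Int),
      ((l.zip ((l.drop 1).map PySem.Chars.isalpha ++ [false])).foldl pvIndelStep (i, d, prev)).1
        = i + (pvG prev l).1 ∧
      ((l.zip ((l.drop 1).map PySem.Chars.isalpha ++ [false])).foldl pvIndelStep (i, d, prev)).2.1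
        = d + (pvG prev l).2 := by
  induction l with
  | nil => intro prev i d; simp [pvG]
  | cons c rest ih =>
    intro prev i d
    rw [pv_zipNxt_cons]
    simp only [List.foldl_cons, pvIndelStep, pvG]
    by_cases hdash : (c == '-') = true
    · simp only [hdash, if_true]
      by_cases hpa : prev.any PySem.Chars.isalpha = true
      · simp only [hpa, if_true]
        obtain ⟨h1, h2⟩ := ih (some c) i (d + 1)
        exact ⟨by rw [h1], by rw [h2]; ring⟩
      · simp only [hpa, Bool.false_eq_true, if_false]
        by_cases hnx : rest.head?.any PySem.Chars.isalpha = true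
        · simp only [hnx, if_true]
          obtain ⟨h1, h2⟩ := ih (some c) (i + 1) d
          exact ⟨by rw [h1]; ring, by rw [h2]⟩
        · simp only [hnx, Bool.false_eq_true, if_false]
          exact ih (some c) i d
    · simp only [hdash, Bool.false_eq_true, if_false]
      exact ih (some c) i d

-- ===== VERDICT (by name: the statement is the Claim_ definition above) =====
theorem parse_btop_spec : Claim_equal_parse_btop := by
  intro btop _
  unfold Spec_parse_btop parse_btop parse_btop_alt
  rw [pvLoopA_spec btop.toList.length btop.toList (le_refl _)]
  obtain ⟨h1, h2⟩ := pvIndelFold_spec btop.toList none 0 0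
  have h0 := pvSnpFold_spec btop.toList 0 0
  simp only at h0 h1 h2 ⊢
  rw [h0, h1, h2]
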